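-- pv_equiv track=rewrite | github.com/sliced-ai/slice-monorepo | data_generation/character-create/fine_tuner.py | _transform_conversation
-- ===== SOURCE A (Python) =====
-- def _transform_conversation(example):
--     try:
--         conversation_text = example['text']
--         segments = conversation_text.split('###')
--         cumulative_conversation = []
--         reformatted_segments = []
--         for i in range(0, len(segments) - 1, 2):
--             role, human_text = segments[i].strip().split(":", 1)
--             assistant_text = segments[i + 1].strip().replace('Input:', '').strip()
--             if role.strip() == "Luna Rodriguez":
--                 cumulative_conversation.append(f'<s>[INST]  [/INST] {human_text} </s>')
--             else:
--                 cumulative_conversation.append(f'<s>[INST] {human_text} [/INST] {assistant_text} </s>')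
--             reformatted_segments.append(''.join(cumulative_conversation))
--         return {'text': reformatted_segments}
--     except Exception as e:
--         pass
-- ===== SOURCE B (Python) =====
-- def _pieces(segments):
--     # one formatted fragment per (human, assistant) segment pair; odd leftover dropped
--     if len(segments) < 2:
--         return []
--     head, nxt = segments[0], segments[1]
--     role, human_text = head.strip().split(":", 1)
--     if role.strip() == "Luna Rodriguez":
--         piece = '<s>[INST]  [/INST] ' + human_text + ' </s>'
--     else:
--         assistant_text = nxt.strip().replace('Input:', '').strip()
--         piece = '<s>[INST] ' + human_text + ' [/INST] ' + assistant_text + ' </s>'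
--     return [piece] + _pieces(segments[2:])
--
-- def _accumulate(pieces, prefix):
--     # running-prefix cumulative concatenations
--     if not pieces:
--         return []
--     acc = prefix + pieces[0]
--     return [acc] + _accumulate(pieces[1:], acc)
--
-- def _transform_conversation(example):
--     try:
--         segments = example['text'].split('###')
--         return {'text': _accumulate(_pieces(segments), '')}
--     except Exception:
--         pass
-- ===== Notes on version B (the rewrite author's own statement) =====
-- stated objective: simpler
-- what changed: A's single index loop over range(0,len-1,2) that re-joins the whole growing cumulative list on every iteration is replaced by two small recursive passes: build the formatted fragment per segment pair, then accumulate cumulative strings with a running prefix (no indexing, no repeated join).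
import Mathlib
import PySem

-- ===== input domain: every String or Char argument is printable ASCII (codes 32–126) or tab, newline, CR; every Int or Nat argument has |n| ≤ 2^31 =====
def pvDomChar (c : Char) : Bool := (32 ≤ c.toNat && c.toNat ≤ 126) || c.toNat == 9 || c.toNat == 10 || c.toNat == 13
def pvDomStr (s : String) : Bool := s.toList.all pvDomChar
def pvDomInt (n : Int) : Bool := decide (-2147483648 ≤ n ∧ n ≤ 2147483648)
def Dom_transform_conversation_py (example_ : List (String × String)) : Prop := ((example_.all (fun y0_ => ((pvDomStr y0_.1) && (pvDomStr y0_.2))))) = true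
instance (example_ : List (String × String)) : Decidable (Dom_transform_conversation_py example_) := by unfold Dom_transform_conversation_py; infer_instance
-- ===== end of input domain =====

-- B replaces A's index loop (join of a growing list each iteration) by two recursive passes:
-- build the formatted fragment per segment pair, then accumulate running-prefix concatenations.
-- Objective: simpler. Python B agrees with A everywhere (A's try/except makes it total: None on any parse failure).

-- ===== PORT A =====
-- the loop body of A over the index list range(0, len(segments)-1, 2); none = an exception was raised
def tcpLoopA (segs : List String) : List Int → (List String × List String) → Option (List String × List String)
  | [], st => some st
  | i :: is, (cum, ref) =>
    match PySem.List.pyGet? segs i with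
    | none => none
    | some si =>
      match PySem.Str.splitMax? (PySem.Str.strip si) ":" 1 with
      | some [role, human_text] =>
        match PySem.List.pyGet? segs (i + 1) with
        | none => none
        | some sa =>
          let assistant_text := PySem.Str.strip (PySem.Str.replace (PySem.Str.strip sa) "Input:" "")
          let piece :=
            if PySem.Str.strip role == "Luna Rodriguez" then
              PySem.Str.join "" ["<s>[INST]  [/INST] ", human_text, " </s>"]
            else
              PySem.Str.join "" ["<s>[INST] ", human_text, " [/INST] ", assistant_text, " </s>"]
          let cum' := cum ++ [piece]
          tcpLoopA segs is (cum', ref ++ [PySem.Str.join "" cum'])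
      | _ => none  -- role, human_text = … unpacking fails (no ':'), or sep empty (unreachable)

def transform_conversation_py (example_ : List (String × String)) : Option (List (String × List String)) :=
  match PySem.Dict.get? (PySem.Dict.mk example_) "text" with
  | none => none  -- KeyError, caught by the bare except
  | some conversation_text =>
    match PySem.Str.split? conversation_text "###" with
    | none => none  -- unreachable: separator is non-empty
    | some segments =>
      match tcpLoopA segments (PySem.List.pyRange 0 ((segments.length : Int) - 1) 2) ([], []) with
      | none => none
      | some (_, reformatted_segments) => some [("text", reformatted_segments)]

-- ===== PORT B =====
-- _pieces: one formatted fragment per segment pair; none = split(":", 1) unpacking failed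
def tcbPieces : List String → Option (List String)
  | [] => some []
  | [_] => some []
  | head :: nxt :: rest =>
    match PySem.Str.splitMax? (PySem.Str.strip head) ":" 1 with
    | some [role, human_text] =>
      let piece :=
        if PySem.Str.strip role == "Luna Rodriguez" then
          PySem.Str.join "" ["<s>[INST]  [/INST] ", human_text, " </s>"]
        else
          PySem.Str.join "" ["<s>[INST] ", human_text, " [/INST] ",
            PySem.Str.strip (PySem.Str.replace (PySem.Str.strip nxt) "Input:" ""), " </s>"]
      (tcbPieces rest).map (piece :: ·)
    | _ => none

-- _accumulate: running-prefix cumulative concatenations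
def tcbAccum : List String → String → List String
  | [], _ => []
  | p :: ps, prefix_ =>
    let acc := PySem.Str.join "" [prefix_, p]
    acc :: tcbAccum ps acc

def transform_conversation_py_alt (example_ : List (String × String)) : Option (List (String × List String)) :=
  match PySem.Dict.get? (PySem.Dict.mk example_) "text" with
  | none => none
  | some txt =>
    match PySem.Str.split? txt "###" with
    | none => none
    | some segments =>
      match tcbPieces segments with
      | none => none
      | some ps => some [("text", tcbAccum ps "")]

-- ===== PRECONDITION & SPEC =====
def Spec_transform_conversation_py (example_ : List (String × String)) (out : Option (List (String × List String))) : Prop := out = transform_conversation_py_alt example_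
instance (example_ : List (String × String)) (out : Option (List (String × List String))) : Decidable (Spec_transform_conversation_py example_ out) := by unfold Spec_transform_conversation_py; infer_instance

-- ===== CLAIM (what is proved, stated in full; the proofs are below) =====
def Claim_equal_transform_conversation_py : Prop := ∀ (example_ : List (String × String)), Dom_transform_conversation_py example_ → Spec_transform_conversation_py example_ (transform_conversation_py example_)

-- ===== LEMMAS AND PROOFS =====

-- join with the empty separator is flatten
theorem join_nil_flatten (parts : List (List Char)) : PySem.Chars.join [] parts = parts.flatten := by
  induction parts with
  | nil => rfl
  | cons p ps ih =>
    simp [PySem.Chars.join, List.intercalate] at *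
    induction ps <;> simp_all [List.intersperse]

-- join with empty separator of a snoc: the running-prefix step of B equals A's re-join of the grown list
theorem join_empty_snoc (l : List String) (p : String) :
    PySem.Str.join "" (l ++ [p]) = PySem.Str.join "" [PySem.Str.join "" l, p] := by
  apply String.toList_inj.mp
  simp [PySem.Str.toList_join, join_nil_flatten]

-- step-2 range is empty when b ≤ a
theorem pyRange_two_nil (a b : Int) (h : b ≤ a) : PySem.List.pyRange a b 2 = [] := by
  rw [PySem.List.pyRange_of_pos a b (by norm_num)]
  simp [show ¬ a < b by omega]

-- step-2 range cons
theorem pyRange_two_cons (a b : Int) (h : a < b) :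
    PySem.List.pyRange a b 2 = a :: PySem.List.pyRange (a + 2) b 2 := by
  rw [PySem.List.pyRange_of_pos a b (by norm_num), PySem.List.pyRange_of_pos (a+2) b (by norm_num)]
  by_cases h2 : a + 2 < b
  · rw [if_pos h, if_pos h2]
    have : ((b - a + 2 - 1) / 2).toNat = ((b - (a+2) + 2 - 1) / 2).toNat + 1 := by omega
    rw [this, List.range_succ_eq_map]
    simp [List.map_map, Function.comp]
    intro k _; ring
  · rw [if_pos h, if_neg h2]
    have : ((b - a + 2 - 1) / 2).toNat = 1 := by omega
    simp [this, List.range_succ]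

-- the tail of the step-2 range, shifted down by 2
theorem pyRange_two_shift (m : Int) :
    PySem.List.pyRange 2 (m + 2) 2 = (PySem.List.pyRange 0 m 2).map (· + 2) := by
  rw [PySem.List.pyRange_of_pos 2 (m+2) (by norm_num), PySem.List.pyRange_of_pos 0 m (by norm_num)]
  by_cases hm : 0 < m
  · rw [if_pos (by omega), if_pos hm]
    have : (m + 2 - 2 + 2 - 1) / 2 = (m - 0 + 2 - 1) / 2 := by omega
    rw [this]
    simp [List.map_map, Function.comp]
    intro k _; ring
  · rw [if_neg (by omega), if_neg hm]; rfl

-- shifting the whole index list by 2 skips the first two segments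
theorem tcpLoopA_shift (x y : String) (segs : List String) (idxs : List Int)
    (h : ∀ i ∈ idxs, 0 ≤ i) (st : List String × List String) :
    tcpLoopA (x :: y :: segs) (idxs.map (· + 2)) st = tcpLoopA segs idxs st := by
  induction idxs generalizing st with
  | nil => rfl
  | cons i is ih =>
    obtain ⟨cum, ref⟩ := st
    have hi : (0:Int) ≤ i := h i (by simp)
    have g1 : PySem.List.pyGet? (x :: y :: segs) (i + 2) = PySem.List.pyGet? segs i := by
      rw [PySem.List.pyGet?_of_nonneg (x :: y :: segs) (i := i + 2) (by omega),
          PySem.List.pyGet?_of_nonneg segs hi]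
      have : (i + 2).toNat = i.toNat + 2 := by omega
      simp [this]
    have g2 : PySem.List.pyGet? (x :: y :: segs) (i + 2 + 1) = PySem.List.pyGet? segs (i + 1) := by
      rw [PySem.List.pyGet?_of_nonneg (x :: y :: segs) (i := i + 2 + 1) (by omega),
          PySem.List.pyGet?_of_nonneg segs (i := i + 1) (by omega)]
      have : (i + 2 + 1).toNat = (i + 1).toNat + 2 := by omega
      simp [this]
    simp only [List.map_cons, tcpLoopA, g1, g2]
    cases PySem.List.pyGet? segs i with
    | none => rfl
    | some si =>
      dsimp only
      generalize PySem.Str.splitMax? (PySem.Str.strip si) ":" 1 = r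
      cases r with
      | none => rfl
      | some l =>
        match l with
        | [] => rfl
        | [_] => rfl
        | _ :: _ :: _ :: _ => rfl
        | [role, human] =>
          dsimp only
          cases PySem.List.pyGet? segs (i + 1) with
          | none => rfl
          | some sa =>
            dsimp only
            exact ih (fun j hj => h j (by simp [hj])) _

-- main loop characterisation: A's loop over the step-2 index range computes B's pieces-then-accumulate
theorem tcpLoopA_eq (segs : List String) : ∀ cum ref,
    tcpLoopA segs (PySem.List.pyRange 0 ((segs.length : Int) - 1) 2) (cum, ref) =
      (tcbPieces segs).map
        (fun ps => (cum ++ ps, ref ++ tcbAccum ps (PySem.Str.join "" cum))) := by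
  induction segs using tcbPieces.induct with
  | case1 =>
    intro cum ref
    rw [pyRange_two_nil 0 _ (by simp)]
    simp [tcpLoopA, tcbPieces, tcbAccum]
  | case2 x =>
    intro cum ref
    rw [pyRange_two_nil 0 _ (by simp)]
    simp [tcpLoopA, tcbPieces, tcbAccum]
  | case3 head nxt rest role human hsp ih =>
    intro cum ref
    have hlen : ((head :: nxt :: rest).length : Int) - 1 = (rest.length : Int) - 1 + 2 := by
      simp; omega
    rw [hlen, pyRange_two_cons 0 _ (by omega), show (0:Int) + 2 = 2 by norm_num,
        pyRange_two_shift ((rest.length : Int) - 1)]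
    simp only [tcpLoopA, PySem.List.pyGet?_zero_cons, hsp]
    have g2 : PySem.List.pyGet? (head :: nxt :: rest) (0 + 1) = some nxt := by
      rw [PySem.List.pyGet?_of_nonneg (head :: nxt :: rest) (i := 0 + 1) (by norm_num)]; rfl
    rw [g2]
    dsimp only
    rw [tcpLoopA_shift head nxt rest _
      (fun j hj => ((PySem.List.mem_pyRange_iff_of_pos (by norm_num) j).mp hj).1) _]
    rw [ih]
    simp only [tcbPieces, hsp]
    cases tcbPieces rest with
    | none => rfl
    | some ps =>
      simp only [Option.map_some]
      congr 1
      · simp [tcbAccum, ← join_empty_snoc]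
  | case4 head nxt rest hshape =>
    intro cum ref
    have hlen : ((head :: nxt :: rest).length : Int) - 1 = (rest.length : Int) - 1 + 2 := by
      simp; omega
    rw [hlen, pyRange_two_cons 0 _ (by omega)]
    simp only [tcpLoopA, PySem.List.pyGet?_zero_cons]
    cases hs : PySem.Str.splitMax? (PySem.Str.strip head) ":" 1 with
    | none => simp [tcbPieces, hs]
    | some l =>
      match l with
      | [] => simp [tcbPieces, hs]
      | [_] => simp [tcbPieces, hs]
      | _ :: _ :: _ :: _ => simp [tcbPieces, hs]
      | [role, human] => exact absurd hs (fun h => hshape role human h)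

-- ===== VERDICT (by name: the statement is the Claim_ definition above) =====
theorem transform_conversation_py_spec : Claim_equal_transform_conversation_py := by
  intro example_ _
  unfold Spec_transform_conversation_py transform_conversation_py transform_conversation_py_alt
  cases PySem.Dict.get? (PySem.Dict.mk example_) "text" with
  | none => rfl
  | some txt =>
    cases hs : PySem.Str.split? txt "###" with
    | none => simp [hs]
    | some segments =>
      simp only [hs, tcpLoopA_eq segments [] []]
      cases tcbPieces segments with
      | none => rfl
      | some ps => simp [PySem.Str.join]
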